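-- pv_equiv track=rewrite | github.com/rudalsgecko/method-dep | src/methoddep/build/binlog_parser.py | _split_commandline
-- ===== SOURCE A (Python) =====
-- def _split_commandline(cmdline: str) -> list[str]:
--     """MSBuild emits CL arguments as a single string. Split respecting
--     quoted segments."""
--     out: list[str] = []
--     buf: list[str] = []
--     in_quote = False
--     for ch in cmdline:
--         if ch == '"':
--             in_quote = not in_quote
--             continue
--         if ch.isspace() and not in_quote:
--             if buf:
--                 out.append("".join(buf))
--                 buf = []
--             continue
--         buf.append(ch)
--     if buf:
--         out.append("".join(buf))
--     return out
-- ===== SOURCE B (Python) =====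
-- def _split_commandline(cmdline: str) -> list[str]:
--     """Index-based scanner: skip whitespace, then consume one token as a run
--     of quoted segments and plain runs taken with whole-slice scans."""
--     out: list[str] = []
--     i, n = 0, len(cmdline)
--     while i < n:
--         if cmdline[i].isspace():
--             i += 1
--             continue
--         tok = ""
--         while i < n:
--             c = cmdline[i]
--             if c == '"':
--                 j = i + 1
--                 while j < n and cmdline[j] != '"':
--                     j += 1
--                 tok += cmdline[i + 1:j]
--                 i = j + 1 if j < n else j
--             elif c.isspace():
--                 break
--             else:
--                 j = i
--                 while j < n and cmdline[j] != '"' and not cmdline[j].isspace():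
--                     j += 1
--                 tok += cmdline[i:j]
--                 i = j
--         if tok:
--             out.append(tok)
--     return out
-- ===== Notes on version B (the rewrite author's own statement) =====
-- stated objective: alternative
-- what changed: Replaced A's single char-by-char state machine (out/buf/in_quote flag) by a two-level scanner that skips whitespace and then consumes each token as whole quoted segments and plain runs taken by slice scans.
import Mathlib
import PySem

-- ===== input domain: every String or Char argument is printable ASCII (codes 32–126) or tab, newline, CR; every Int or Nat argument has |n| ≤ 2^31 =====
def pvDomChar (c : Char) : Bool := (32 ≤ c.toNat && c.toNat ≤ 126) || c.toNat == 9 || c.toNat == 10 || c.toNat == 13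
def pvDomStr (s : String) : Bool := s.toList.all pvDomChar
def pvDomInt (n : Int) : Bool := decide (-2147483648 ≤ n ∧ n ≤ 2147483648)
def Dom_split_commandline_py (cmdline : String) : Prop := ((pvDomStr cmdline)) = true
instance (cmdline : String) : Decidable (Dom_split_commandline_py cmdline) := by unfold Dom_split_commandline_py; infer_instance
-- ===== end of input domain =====

-- B replaces A's single char-by-char state machine (out/buf/in_quote) by a two-level
-- scanner: skip whitespace, then consume one token as whole quoted segments and
-- plain runs; objective: alternative structure, same exact behaviour.

-- ===== PORT A =====
-- literal port of A's single loop: out / buf / in_quote state, one char at a time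
def pvALoop : List Char → List String → List Char → Bool → List String
  | [], out, buf, _ => if buf ≠ [] then out ++ [String.ofList buf] else out
  | c :: rest, out, buf, q =>
    if c = '"' then pvALoop rest out buf (!q)
    else if PySem.Chars.isspace c && !q then
      if buf ≠ [] then pvALoop rest (out ++ [String.ofList buf]) [] q
      else pvALoop rest out buf q
    else pvALoop rest out (buf ++ [c]) q

def split_commandline_py (cmdline : String) : List String :=
  pvALoop cmdline.toList [] [] false

-- ===== PORT B =====
-- B's inner `while j` index scans over slices become takeWhile/dropWhile on the tail;
-- B's `while i < n` loops are ported with an explicit fuel counter (a pure totality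
-- device: fuel = the remaining length always suffices, see the *_fuel lemmas below)
def pvNotQuote (x : Char) : Bool := x ≠ '"'
def pvPlain (x : Char) : Bool := x ≠ '"' && !(PySem.Chars.isspace x)

-- port of B's inner token loop: consume quoted segments / plain runs, return (tok, rest)
def pvBTokenF : Nat → List Char → List Char → (List Char × List Char)
  | 0, l, tok => (tok, l)
  | _ + 1, [], tok => (tok, [])
  | fuel + 1, c :: rest, tok =>
    if c = '"' then
      pvBTokenF fuel ((rest.dropWhile pvNotQuote).tail) (tok ++ rest.takeWhile pvNotQuote)
    else if PySem.Chars.isspace c then (tok, c :: rest)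
    else
      pvBTokenF fuel ((c :: rest).dropWhile pvPlain) (tok ++ (c :: rest).takeWhile pvPlain)

def pvBToken (l : List Char) (tok : List Char) : List Char × List Char :=
  pvBTokenF l.length l tok

-- port of B's outer loop: skip whitespace, scan one token, append if non-empty
def pvBOuterF : Nat → List Char → List String
  | 0, _ => []
  | _ + 1, [] => []
  | fuel + 1, c :: rest =>
    if PySem.Chars.isspace c then pvBOuterF fuel rest
    else
      (if (pvBToken (c :: rest) []).1 ≠ [] then [String.ofList (pvBToken (c :: rest) []).1] else [])
        ++ pvBOuterF fuel (pvBToken (c :: rest) []).2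

def pvBOuter (l : List Char) : List String :=
  pvBOuterF l.length l

def split_commandline_py_alt (cmdline : String) : List String :=
  pvBOuter cmdline.toList

-- ===== PRECONDITION & SPEC =====
def Spec_split_commandline_py (cmdline : String) (out : List String) : Prop := out = split_commandline_py_alt cmdline
instance (cmdline : String) (out : List String) : Decidable (Spec_split_commandline_py cmdline out) := by unfold Spec_split_commandline_py; infer_instance

-- ===== CLAIM (what is proved, stated in full; the proofs are below) =====
def Claim_equal_split_commandline_py : Prop := ∀ (cmdline : String), Dom_split_commandline_py cmdline → Spec_split_commandline_py cmdline (split_commandline_py cmdline)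

-- ===== LEMMAS AND PROOFS =====

-- length bounds for the two scan steps (cited by the fuel lemmas below)
theorem pvTl_le (rest : List Char) :
    ((rest.dropWhile pvNotQuote).tail).length ≤ rest.length := by
  have h1 := List.length_dropWhile_le pvNotQuote rest
  have h2 : (rest.dropWhile pvNotQuote).tail.length = (rest.dropWhile pvNotQuote).length - 1 :=
    List.length_tail
  omega

theorem pvDl_le (c : Char) (rest : List Char) (hc : pvPlain c = true) :
    ((c :: rest).dropWhile pvPlain).length ≤ rest.length := by
  rw [List.dropWhile_cons_of_pos hc]
  exact List.length_dropWhile_le pvPlain rest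

-- any fuel ≥ the remaining length computes the same result
theorem pvBTokenF_fuel : ∀ (f1 f2 : Nat) (l tok : List Char),
    l.length ≤ f1 → l.length ≤ f2 → pvBTokenF f1 l tok = pvBTokenF f2 l tok := by
  intro f1
  induction f1 with
  | zero =>
    intro f2 l tok h1 _
    have : l = [] := List.eq_nil_of_length_eq_zero (by omega)
    subst this
    cases f2 <;> rfl
  | succ f ih =>
    intro f2 l tok h1 h2
    match l with
    | [] => cases f2 <;> rfl
    | c :: rest =>
      match f2 with
      | 0 => simp at h2
      | g + 1 =>
        simp only [List.length_cons] at h1 h2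
        rw [pvBTokenF, pvBTokenF]
        split_ifs with hq hs
        · exact ih g _ _ (le_trans (pvTl_le rest) (by omega)) (le_trans (pvTl_le rest) (by omega))
        · rfl
        · have hc : pvPlain c = true := by simp [pvPlain, hq, hs]
          exact ih g _ _ (le_trans (pvDl_le c rest hc) (by omega))
            (le_trans (pvDl_le c rest hc) (by omega))

-- the equations pvBToken satisfies (B's inner loop, one iteration)
theorem pvBToken_nil (tok : List Char) : pvBToken [] tok = (tok, []) := rfl

theorem pvBToken_cons (c : Char) (rest tok : List Char) :
    pvBToken (c :: rest) tok =
      if c = '"' then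
        pvBToken ((rest.dropWhile pvNotQuote).tail) (tok ++ rest.takeWhile pvNotQuote)
      else if PySem.Chars.isspace c then (tok, c :: rest)
      else pvBToken ((c :: rest).dropWhile pvPlain) (tok ++ (c :: rest).takeWhile pvPlain) := by
  show pvBTokenF (rest.length + 1) (c :: rest) tok = _
  rw [pvBTokenF]
  split_ifs with hq hs
  · exact pvBTokenF_fuel rest.length _ _ _ (pvTl_le rest) le_rfl
  · rfl
  · have hc : pvPlain c = true := by simp [pvPlain, hq, hs]
    exact pvBTokenF_fuel rest.length _ _ _ (pvDl_le c rest hc) le_rfl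

-- the token scan never grows the rest, and strictly consumes a non-whitespace head
theorem pvBToken_snd_le : ∀ (n : ℕ) (l tok : List Char), l.length ≤ n →
    (pvBToken l tok).2.length ≤ l.length := by
  intro n
  induction n with
  | zero =>
    intro l tok h
    have : l = [] := List.eq_nil_of_length_eq_zero (by omega)
    subst this; simp [pvBToken_nil]
  | succ n ih =>
    intro l tok h
    match l with
    | [] => simp [pvBToken_nil]
    | c :: rest =>
      simp only [List.length_cons] at h
      rw [pvBToken_cons]
      split_ifs with hq hs
      · have := ih _ (tok ++ rest.takeWhile pvNotQuote) (le_trans (pvTl_le rest) (by omega))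
        have := pvTl_le rest
        simp only [List.length_cons]; omega
      · simp
      · have hc : pvPlain c = true := by simp [pvPlain, hq, hs]
        have := ih _ (tok ++ (c :: rest).takeWhile pvPlain) (le_trans (pvDl_le c rest hc) (by omega))
        have := pvDl_le c rest hc
        simp only [List.length_cons]; omega

theorem pvBToken_snd_lt (c : Char) (rest tok : List Char)
    (hs : PySem.Chars.isspace c = false) :
    (pvBToken (c :: rest) tok).2.length < (c :: rest).length := by
  rw [pvBToken_cons]
  split_ifs with hq hsp
  · have := pvBToken_snd_le ((rest.dropWhile pvNotQuote).tail).length _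
      (tok ++ rest.takeWhile pvNotQuote) le_rfl
    have := pvTl_le rest
    simp only [List.length_cons]; omega
  · exact absurd hsp (by simp [hs])
  · have hc : pvPlain c = true := by simp [pvPlain, hq, hs]
    have := pvBToken_snd_le ((c :: rest).dropWhile pvPlain).length _
      (tok ++ (c :: rest).takeWhile pvPlain) le_rfl
    have := pvDl_le c rest hc
    simp only [List.length_cons]; omega

theorem pvBOuterF_fuel : ∀ (f1 f2 : Nat) (l : List Char),
    l.length ≤ f1 → l.length ≤ f2 → pvBOuterF f1 l = pvBOuterF f2 l := by
  intro f1
  induction f1 with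
  | zero =>
    intro f2 l h1 _
    have : l = [] := List.eq_nil_of_length_eq_zero (by omega)
    subst this
    cases f2 <;> rfl
  | succ f ih =>
    intro f2 l h1 h2
    match l with
    | [] => cases f2 <;> rfl
    | c :: rest =>
      match f2 with
      | 0 => simp at h2
      | g + 1 =>
        simp only [List.length_cons] at h1 h2
        rw [pvBOuterF, pvBOuterF]
        by_cases hs : PySem.Chars.isspace c = true
        · rw [if_pos hs, if_pos hs]
          exact ih g rest (by omega) (by omega)
        · rw [if_neg hs, if_neg hs]
          have hlt := pvBToken_snd_lt c rest [] (by simpa using hs)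
          simp only [List.length_cons] at hlt
          rw [ih g (pvBToken (c :: rest) []).2 (by omega) (by omega)]

theorem pvBOuter_nil : pvBOuter [] = [] := rfl

theorem pvBOuter_cons (c : Char) (rest : List Char) :
    pvBOuter (c :: rest) =
      if PySem.Chars.isspace c then pvBOuter rest
      else
        (if (pvBToken (c :: rest) []).1 ≠ [] then [String.ofList (pvBToken (c :: rest) []).1] else [])
          ++ pvBOuter (pvBToken (c :: rest) []).2 := by
  show pvBOuterF (rest.length + 1) (c :: rest) = _
  rw [pvBOuterF]
  by_cases hs : PySem.Chars.isspace c = true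
  · rw [if_pos hs, if_pos hs]
    rfl
  · rw [if_neg hs, if_neg hs]
    have hlt := pvBToken_snd_lt c rest [] (by simpa using hs)
    simp only [List.length_cons] at hlt
    congr 1
    exact pvBOuterF_fuel rest.length (pvBToken (c :: rest) []).2.length
      (pvBToken (c :: rest) []).2 (by omega) le_rfl



-- A's `out` accumulator factors out
theorem pvALoop_out (cs : List Char) : ∀ (out : List String) (buf : List Char) (q : Bool),
    pvALoop cs out buf q = out ++ pvALoop cs [] buf q := by
  induction cs with
  | nil =>
    intro out buf q
    simp only [pvALoop]; split_ifs <;> simp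
  | cons c rest ih =>
    intro out buf q
    simp only [pvALoop]
    split_ifs with h1 h2 h3
    · exact ih out buf (!q)
    · rw [ih (out ++ [String.ofList buf]) [] q, ih ([] ++ [String.ofList buf]) [] q]
      simp
    · exact ih out buf q
    · exact ih out (buf ++ [c]) q

-- B's `tok` accumulator factors out
theorem pvBToken_acc : ∀ (n : ℕ) (l : List Char) (tok : List Char), l.length ≤ n →
    pvBToken l tok = (tok ++ (pvBToken l []).1, (pvBToken l []).2) := by
  intro n
  induction n with
  | zero =>
    intro l tok h
    have : l = [] := List.eq_nil_of_length_eq_zero (by omega)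
    subst this; simp [pvBToken_nil]
  | succ n ih =>
    intro l tok h
    match l with
    | [] => simp [pvBToken_nil]
    | c :: rest =>
      simp only [List.length_cons] at h
      by_cases h1 : c = '"'
      · subst h1
        rw [pvBToken_cons, if_pos rfl, pvBToken_cons, if_pos rfl]
        have htl : (rest.dropWhile pvNotQuote).tail.length ≤ n :=
          le_trans (pvTl_le rest) (by omega)
        rw [ih _ (tok ++ rest.takeWhile pvNotQuote) htl, ih _ ([] ++ rest.takeWhile pvNotQuote) htl]
        simp
      · by_cases h2 : PySem.Chars.isspace c
        · rw [pvBToken_cons, if_neg h1, if_pos h2, pvBToken_cons, if_neg h1, if_pos h2]; simp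
        · rw [pvBToken_cons, if_neg h1, if_neg h2, pvBToken_cons, if_neg h1, if_neg h2]
          have hc : pvPlain c = true := by simp [pvPlain, h1, h2]
          have hdl : ((c :: rest).dropWhile pvPlain).length ≤ n :=
            le_trans (pvDl_le c rest hc) (by omega)
          rw [ih _ (tok ++ (c :: rest).takeWhile pvPlain) hdl,
              ih _ ([] ++ (c :: rest).takeWhile pvPlain) hdl]
          simp

-- inside a quote A swallows everything up to the closing quote (or the end)
theorem pvALoop_quote (cs : List Char) : ∀ (buf : List Char),
    pvALoop cs [] buf true =
      pvALoop ((cs.dropWhile pvNotQuote).tail) [] (buf ++ cs.takeWhile pvNotQuote) false := by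
  induction cs with
  | nil => intro buf; simp [pvALoop]
  | cons c rest ih =>
    intro buf
    by_cases h1 : c = '"'
    · subst h1
      have hq : pvNotQuote '"' = false := by simp [pvNotQuote]
      rw [List.dropWhile_cons_of_neg (by simp [hq]), List.takeWhile_cons_of_neg (by simp [hq])]
      rw [pvALoop, if_pos rfl]
      simp
    · have hq : pvNotQuote c = true := by simp [pvNotQuote, h1]
      rw [List.dropWhile_cons_of_pos hq, List.takeWhile_cons_of_pos hq]
      rw [pvALoop, if_neg h1, if_neg (by simp)]
      rw [ih (buf ++ [c])]
      simp

-- the token scan started anywhere first consumes the current plain run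
theorem pvBToken_plainstep (l : List Char) :
    pvBToken l [] = ((l.takeWhile pvPlain) ++ (pvBToken (l.dropWhile pvPlain) []).1,
                     (pvBToken (l.dropWhile pvPlain) []).2) := by
  cases l with
  | nil => simp [pvBToken_nil]
  | cons c rest =>
    by_cases hc : pvPlain c = true
    · have h1 : ¬ c = '"' := by
        intro hcq; subst hcq; simp [pvPlain] at hc
      have h2 : ¬ PySem.Chars.isspace c = true := by
        intro hcs; simp [pvPlain, hcs] at hc
      rw [pvBToken_cons, if_neg h1, if_neg h2]
      rw [pvBToken_acc ((c :: rest).dropWhile pvPlain).length _ _ le_rfl]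
      simp
    · rw [List.takeWhile_cons_of_neg (by simpa using hc),
          List.dropWhile_cons_of_neg (by simpa using hc)]
      simp

-- one unfolding of B's outer loop valid for every head
theorem pvBOuter_eq (cs : List Char) :
    pvBOuter cs = (if (pvBToken cs []).1 ≠ [] then [String.ofList (pvBToken cs []).1] else [])
      ++ pvBOuter (pvBToken cs []).2 := by
  cases cs with
  | nil => simp [pvBOuter_nil, pvBToken_nil]
  | cons c rest =>
    by_cases hs : PySem.Chars.isspace c = true
    · have h1 : ¬ c = '"' := by
        intro hcq; subst hcq; simp [PySem.Chars.isspace] at hs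
      have hB : pvBToken (c :: rest) [] = ([], c :: rest) := by
        rw [pvBToken_cons, if_neg h1, if_pos hs]
      rw [hB]; simp
    · rw [pvBOuter_cons, if_neg hs]

-- main invariant: A's loop in the out-of-quote state with pending buf equals
-- B's "finish the current token, then restart the outer loop"
theorem pvMain : ∀ (n : ℕ) (cs : List Char) (buf : List Char), cs.length ≤ n →
    pvALoop cs [] buf false =
      (if buf ++ (pvBToken cs []).1 ≠ [] then [String.ofList (buf ++ (pvBToken cs []).1)] else [])
        ++ pvBOuter (pvBToken cs []).2 := by
  intro n
  induction n with
  | zero =>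
    intro cs buf h
    have : cs = [] := List.eq_nil_of_length_eq_zero (by omega)
    subst this
    simp only [pvALoop, pvBToken_nil, pvBOuter_nil]
    split_ifs with h1 h2 <;> simp_all
  | succ n ih =>
    intro cs buf h
    match cs with
    | [] =>
      simp only [pvALoop, pvBToken_nil, pvBOuter_nil]
      split_ifs with h1 h2 <;> simp_all
    | c :: rest =>
      simp only [List.length_cons] at h
      by_cases h1 : c = '"'
      · subst h1
        rw [pvALoop, if_pos rfl]
        show pvALoop rest [] buf (!false) = _
        rw [Bool.not_false, pvALoop_quote]
        have htl : (rest.dropWhile pvNotQuote).tail.length ≤ n :=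
          le_trans (pvTl_le rest) (by omega)
        rw [ih _ (buf ++ rest.takeWhile pvNotQuote) htl]
        have hB : pvBToken ('"' :: rest) [] =
            ((rest.takeWhile pvNotQuote) ++ (pvBToken ((rest.dropWhile pvNotQuote).tail) []).1,
             (pvBToken ((rest.dropWhile pvNotQuote).tail) []).2) := by
          rw [pvBToken_cons, if_pos rfl,
              pvBToken_acc ((rest.dropWhile pvNotQuote).tail).length _ _ le_rfl]
          simp
        rw [hB]
        simp [List.append_assoc]
      · by_cases h2 : PySem.Chars.isspace c = true
        · have hB : pvBToken (c :: rest) [] = ([], c :: rest) := by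
            rw [pvBToken_cons, if_neg h1, if_pos h2]
          have hO : pvBOuter (c :: rest) = pvBOuter rest := by
            rw [pvBOuter_cons, if_pos h2]
          have hL : pvALoop (c :: rest) [] buf false =
              (if buf ≠ [] then [String.ofList buf] else []) ++ pvALoop rest [] [] false := by
            rw [pvALoop, if_neg h1, if_pos (by simp [h2])]
            split_ifs with hb
            · rw [pvALoop_out rest ([] ++ [String.ofList buf])]; simp [hb]
            · simp at hb
              simp [hb]
          rw [hL, ih rest [] (by omega), hB]
          rw [show ([] : List Char) ++ (pvBToken rest []).1 = (pvBToken rest []).1 from by simp,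
              ← pvBOuter_eq rest, hO]
          simp
        · have hc : pvPlain c = true := by simp [pvPlain, h1, h2]
          have hL : pvALoop (c :: rest) [] buf false = pvALoop rest [] (buf ++ [c]) false := by
            rw [pvALoop, if_neg h1, if_neg (by simp [h2])]
          rw [hL, ih rest (buf ++ [c]) (by omega), pvBToken_plainstep rest]
          have hB : pvBToken (c :: rest) [] =
              ((c :: rest.takeWhile pvPlain) ++ (pvBToken (rest.dropWhile pvPlain) []).1,
               (pvBToken (rest.dropWhile pvPlain) []).2) := by
            rw [pvBToken_cons, if_neg h1, if_neg h2,
                List.dropWhile_cons_of_pos hc, List.takeWhile_cons_of_pos hc,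
                pvBToken_acc (rest.dropWhile pvPlain).length _ _ le_rfl]
            simp
          rw [hB]
          simp [List.append_assoc]

-- ===== VERDICT (by name: the statement is the Claim_ definition above) =====
theorem split_commandline_py_spec : Claim_equal_split_commandline_py := by
  intro cmdline _
  unfold Spec_split_commandline_py split_commandline_py split_commandline_py_alt
  rw [pvMain cmdline.toList.length cmdline.toList [] le_rfl]
  rw [show ([] : List Char) ++ (pvBToken cmdline.toList []).1 = (pvBToken cmdline.toList []).1
        from by simp,
      ← pvBOuter_eq]
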